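-- pv_equiv track=rewrite | github.com/lionelMuskwe/communication-practice-v2 | django_api/apps/openai_integration/utils.py | _is_url_context
-- ===== SOURCE A (Python) =====
-- def _is_url_context(before: str) -> bool:
--     """Check if we're inside a URL."""
--     lower = before.lower()
--     url_patterns = ['http://', 'https://', 'www.', 'ftp://']
--     for pattern in url_patterns:
--         if pattern in lower:
--             after_pattern = lower.split(pattern)[-1]
--             if ' ' not in after_pattern:
--                 return True
--     return False
-- ===== SOURCE B (Python) =====
-- def _is_url_context(before: str) -> bool:
--     """Check if we're inside a URL."""
--     lower = before.lower()
--     tail = lower[lower.rfind(' ') + 1:]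
--     return any(p in tail for p in ('http://', 'https://', 'www.', 'ftp://'))
-- ===== Notes on version B (the rewrite author's own statement) =====
-- stated objective: simpler
-- what changed: Instead of A's per-pattern substring test plus split-and-rescan of the last piece, B computes the tail after the last space once (rfind + slice) and checks each URL prefix for membership in that tail, relying on the fact that the last piece of a split has no space exactly when the pattern occurs after the last space.
import Mathlib
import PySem

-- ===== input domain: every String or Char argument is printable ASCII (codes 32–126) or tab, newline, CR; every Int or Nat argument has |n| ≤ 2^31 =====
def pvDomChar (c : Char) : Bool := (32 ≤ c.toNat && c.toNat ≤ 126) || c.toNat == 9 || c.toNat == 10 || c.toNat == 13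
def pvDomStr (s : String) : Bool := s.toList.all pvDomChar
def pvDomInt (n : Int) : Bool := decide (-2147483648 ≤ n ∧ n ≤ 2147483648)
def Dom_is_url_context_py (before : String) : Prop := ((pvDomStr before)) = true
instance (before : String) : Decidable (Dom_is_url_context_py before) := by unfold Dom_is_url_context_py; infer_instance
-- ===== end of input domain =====

-- B replaces A's four substring-split-scan passes by one computation of the tail after the
-- last space (rfind + slice) and a membership test of each prefix pattern in that tail
-- (objective: simpler — one line of string work instead of a split per pattern).

-- ===== PORT A =====
-- the for-loop over url_patterns with its early return
def pvALoop (lower : List Char) : List (List Char) → Bool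
  | [] => false
  | pattern :: rest =>
    if PySem.Chars.isIn pattern lower then
      -- lower.split(pattern)[-1]  (split always returns a nonempty list, so [-1] never raises)
      let afterPattern := PySem.List.pyGetD (PySem.Chars.splitOn lower pattern) (-1) []
      if !(PySem.Chars.isIn [' '] afterPattern) then true
      else pvALoop lower rest
    else pvALoop lower rest

def is_url_context_py (before : String) : Bool :=
  let lower := PySem.Chars.lower before.toList
  pvALoop lower
    [['h','t','t','p',':','/','/'], ['h','t','t','p','s',':','/','/'],
     ['w','w','w','.'], ['f','t','p',':','/','/']]

-- ===== PORT B =====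
def is_url_context_py_alt (before : String) : Bool :=
  let lower := PySem.Chars.lower before.toList
  -- tail = lower[lower.rfind(' ') + 1:]
  let tail := PySem.Chars.slice lower (some (PySem.Chars.rfind lower [' '] + 1)) none
  [['h','t','t','p',':','/','/'], ['h','t','t','p','s',':','/','/'],
   ['w','w','w','.'], ['f','t','p',':','/','/']].any
    (fun p => PySem.Chars.isIn p tail)

-- ===== PRECONDITION & SPEC =====
def Spec_is_url_context_py (before : String) (out : Bool) : Prop := out = is_url_context_py_alt before
instance (before : String) (out : Bool) : Decidable (Spec_is_url_context_py before out) := by unfold Spec_is_url_context_py; infer_instance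

-- ===== CLAIM (what is proved, stated in full; the proofs are below) =====
def Claim_equal_is_url_context_py : Prop := ∀ (before : String), Dom_is_url_context_py before → Spec_is_url_context_py before (is_url_context_py before)

-- ===== LEMMAS AND PROOFS =====

def pvSplit (sep : List Char) : List Char → List (List Char)
  | [] => [[]]
  | c :: rest =>
    if sep.isPrefixOf (c :: rest) then
      [] :: pvSplit sep (rest.drop (sep.length - 1))
    else
      match pvSplit sep rest with
      | [] => [[c]]
      | piece :: ps => (c :: piece) :: ps
termination_by l => l.length
decreasing_by
  · simp only [List.length_drop, List.length_cons]
    omega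
  · simp

lemma pvSplit_ne_nil (sep l : List Char) : pvSplit sep l ≠ [] := by
  fun_induction pvSplit sep l <;> simp_all

lemma pvDrop_eq (sep : List Char) (hsep : sep ≠ []) (c : Char) (rest : List Char) :
    rest.drop (sep.length - 1) = (c :: rest).drop sep.length := by
  cases sep with
  | nil => exact absurd rfl hsep
  | cons a s => simp

lemma pvSplit_singleton (sep : List Char) (hsep : sep ≠ []) :
    ∀ l, (pvSplit sep l).length = 1 → pvSplit sep l = [l] ∧ ¬ sep <:+: l := by
  intro l
  fun_induction pvSplit sep l with
  | case1 => intro _; exact ⟨rfl, by simp [List.infix_nil, hsep]⟩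
  | case2 c rest hpre ih =>
      intro hlen; simp at hlen
      exact absurd hlen (pvSplit_ne_nil sep _)
  | case3 c rest hpre heq ih =>
      exact absurd heq (pvSplit_ne_nil sep rest)
  | case4 c rest hpre piece ps heq ih =>
      intro hlen
      simp at hlen
      subst hlen
      obtain ⟨h1, h2⟩ := ih (by rw [heq]; rfl)
      rw [heq] at h1; injection h1 with h1 _
      subst h1
      refine ⟨rfl, fun hin => ?_⟩
      rcases List.infix_cons_iff.mp hin with h | h
      · exact absurd (List.isPrefixOf_iff_prefix.mpr h) (by simp [hpre])
      · exact h2 h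

lemma pvSplit_two_le (sep : List Char) :
    ∀ l, 2 ≤ (pvSplit sep l).length → sep <:+: l := by
  intro l
  fun_induction pvSplit sep l with
  | case1 => intro h; simp at h
  | case2 c rest hpre ih =>
      intro _
      exact (List.isPrefixOf_iff_prefix.mp hpre).isInfix
  | case3 c rest hpre heq ih => exact absurd heq (pvSplit_ne_nil sep rest)
  | case4 c rest hpre piece ps heq ih =>
      intro hlen
      simp at hlen
      have : 2 ≤ (pvSplit sep rest).length := by rw [heq]; simpa using hlen
      exact (List.infix_cons (ih this))

lemma pvSplit_last_suffix (sep : List Char) (hsep : sep ≠ []) :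
    ∀ l L, (pvSplit sep l).getLast? = some L → L <:+ l ∧ ¬ sep <:+: L := by
  intro l
  fun_induction pvSplit sep l with
  | case1 =>
      intro L hL; simp at hL; subst hL
      exact ⟨List.nil_suffix, by simp [List.infix_nil, hsep]⟩
  | case2 c rest hpre ih =>
      intro L hL
      have hne := pvSplit_ne_nil sep (rest.drop (sep.length - 1))
      obtain ⟨p, ps, hcons⟩ := List.exists_cons_of_ne_nil hne
      rw [hcons, List.getLast?_cons_cons] at hL
      obtain ⟨h1, h2⟩ := ih L (by rw [hcons]; exact hL)
      refine ⟨h1.trans ?_, h2⟩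
      exact (List.drop_suffix _ _).trans (List.suffix_cons c rest)
  | case3 c rest hpre heq ih => exact absurd heq (pvSplit_ne_nil sep rest)
  | case4 c rest hpre piece ps heq ih =>
      intro L hL
      by_cases hps : ps = []
      · subst hps
        simp at hL; subst hL
        obtain ⟨heq1, h2⟩ := pvSplit_singleton sep hsep rest (by rw [heq]; rfl)
        rw [heq] at heq1; injection heq1 with h1 _
        subst h1
        refine ⟨List.suffix_refl _, fun hin => ?_⟩
        rcases List.infix_cons_iff.mp hin with h | h
        · exact absurd (List.isPrefixOf_iff_prefix.mpr h) (by simp [hpre])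
        · exact h2 h
      · obtain ⟨q, qs, hcons⟩ := List.exists_cons_of_ne_nil hps
        rw [hcons, List.getLast?_cons_cons] at hL
        obtain ⟨h1, h2⟩ := ih L (by rw [heq, hcons, List.getLast?_cons_cons]; exact hL)
        exact ⟨h1.trans (List.suffix_cons c rest), h2⟩

lemma pvSplit_last_decomp (sep : List Char) (hsep : sep ≠ []) :
    ∀ l L, sep <:+: l → (pvSplit sep l).getLast? = some L →
      ∃ pre, l = pre ++ sep ++ L := by
  intro l
  fun_induction pvSplit sep l with
  | case1 => intro L h _; exact absurd (List.infix_nil.mp h) hsep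
  | case2 c rest hpre ih =>
      intro L _ hL
      have hp : sep <+: c :: rest := List.isPrefixOf_iff_prefix.mp hpre
      have hdecomp : c :: rest = sep ++ rest.drop (sep.length - 1) := by
        rw [pvDrop_eq sep hsep c rest]; exact List.prefix_append_drop hp
      have hne := pvSplit_ne_nil sep (rest.drop (sep.length - 1))
      obtain ⟨p, ps, hcons⟩ := List.exists_cons_of_ne_nil hne
      rw [hcons, List.getLast?_cons_cons] at hL
      have hL' : (pvSplit sep (rest.drop (sep.length - 1))).getLast? = some L := by
        rw [hcons]; exact hL
      by_cases hlen : (pvSplit sep (rest.drop (sep.length - 1))).length = 1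
      · obtain ⟨h1, _⟩ := pvSplit_singleton sep hsep _ hlen
        rw [h1] at hL'; simp at hL'; subst hL'
        exact ⟨[], by simpa using hdecomp⟩
      · have h2 : 2 ≤ (pvSplit sep (rest.drop (sep.length - 1))).length := by
          have h1 : (pvSplit sep (rest.drop (sep.length - 1))).length ≠ 0 := by
            simpa [List.length_eq_zero_iff] using hne
          omega
        obtain ⟨pre, hpre'⟩ := ih L (pvSplit_two_le sep _ h2) hL'
        exact ⟨sep ++ pre, by rw [hdecomp, hpre']; simp⟩
  | case3 c rest hpre heq ih => exact absurd heq (pvSplit_ne_nil sep rest)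
  | case4 c rest hpre piece ps heq ih =>
      intro L hin hL
      have hrest : sep <:+: rest := by
        rcases List.infix_cons_iff.mp hin with h | h
        · exact absurd (List.isPrefixOf_iff_prefix.mpr h) (by simp [hpre])
        · exact h
      by_cases hps : ps = []
      · subst hps
        obtain ⟨_, h2⟩ := pvSplit_singleton sep hsep rest (by rw [heq]; rfl)
        exact absurd hrest h2
      · obtain ⟨q, qs, hcons⟩ := List.exists_cons_of_ne_nil hps
        rw [hcons, List.getLast?_cons_cons] at hL
        obtain ⟨pre, hp⟩ := ih L hrest (by rw [heq, hcons, List.getLast?_cons_cons]; exact hL)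
        exact ⟨c :: pre, by rw [show c :: rest = c :: (pre ++ sep ++ L) from by rw [← hp]]; simp⟩

lemma modifyHead_id' (xs : List (List Char)) :
    xs.modifyHead (fun x => x) = xs := by cases xs <;> simp

lemma splitOn_go_eq (sep : List Char) (hsep : sep ≠ []) :
    ∀ n l, l.length ≤ n → ∀ fuel, l.length < fuel → ∀ cur acc,
      PySem.Chars.splitOn.go sep fuel l cur acc
        = acc.reverse ++ (pvSplit sep l).modifyHead (fun x => cur.reverse ++ x) := by
  intro n
  induction n with
  | zero =>
      intro l hl fuel hf cur acc
      have hl0 : l = [] := List.length_eq_zero_iff.mp (Nat.le_zero.mp hl)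
      subst hl0
      cases fuel with
      | zero => omega
      | succ f => simp [PySem.Chars.splitOn.go, pvSplit]
  | succ n ih =>
      intro l hl fuel hf cur acc
      cases fuel with
      | zero => omega
      | succ f =>
      cases l with
      | nil => simp [PySem.Chars.splitOn.go, pvSplit]
      | cons c rest =>
        by_cases hpre : sep.isPrefixOf (c :: rest) = true
        · have hdl : ((c :: rest).drop sep.length).length ≤ n := by
            simp at hl ⊢
            have : 0 < sep.length := List.length_pos_of_ne_nil hsep
            omega
          have hdf : ((c :: rest).drop sep.length).length < f := by
            simp at hf ⊢
            have : 0 < sep.length := List.length_pos_of_ne_nil hsep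
            omega
          have hgo : PySem.Chars.splitOn.go sep (f+1) (c :: rest) cur acc
              = PySem.Chars.splitOn.go sep f ((c :: rest).drop sep.length) [] (cur.reverse :: acc) := by
            simp only [PySem.Chars.splitOn.go]
            rw [if_pos hpre]
          rw [hgo, ih _ hdl f hdf [] (cur.reverse :: acc)]
          have hps : pvSplit sep (c :: rest)
              = [] :: pvSplit sep ((c :: rest).drop sep.length) := by
            rw [← pvDrop_eq sep hsep c rest]
            simp only [pvSplit]
            rw [if_pos hpre]
          rw [hps]
          simp [modifyHead_id']
        · have hgo : PySem.Chars.splitOn.go sep (f+1) (c :: rest) cur acc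
              = PySem.Chars.splitOn.go sep f rest (c :: cur) acc := by
            simp only [PySem.Chars.splitOn.go]
            rw [if_neg hpre]
          have hrl : rest.length ≤ n := by simp at hl; omega
          have hrf : rest.length < f := by simp at hf; omega
          rw [hgo, ih _ hrl f hrf (c :: cur) acc]
          obtain ⟨piece, ps, hcons⟩ := List.exists_cons_of_ne_nil (pvSplit_ne_nil sep rest)
          have hps : pvSplit sep (c :: rest) = (c :: piece) :: ps := by
            simp only [pvSplit]
            rw [if_neg hpre, hcons]
          rw [hps, hcons]
          simp

lemma splitOn_eq_pvSplit (sep l : List Char) (hsep : sep ≠ []) :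
    PySem.Chars.splitOn l sep = pvSplit sep l := by
  have := splitOn_go_eq sep hsep l.length l (le_refl _) (l.length + 1) (by omega) [] []
  simpa [PySem.Chars.splitOn, modifyHead_id'] using this


lemma single_pref (s : List Char) (c : Char) (i : Nat) :
    ([c].isPrefixOf (s.drop i) = true) ↔ s[i]? = some c := by
  rw [List.isPrefixOf_iff_prefix, ← List.head?_drop]
  cases s.drop i <;> simp [eq_comm]

lemma rfind_go_spec (s : List Char) (c : Char) (j : Nat) :
    (PySem.Chars.rfind.go s [c] j = -1 ∧ ∀ i ≤ j, s[i]? ≠ some c)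
    ∨ (∃ k, k ≤ j ∧ PySem.Chars.rfind.go s [c] j = (k : Int) ∧ s[k]? = some c ∧
        ∀ i, k < i → i ≤ j → s[i]? ≠ some c) := by
  induction j with
  | zero =>
      by_cases h : s[0]? = some c
      · right
        have hp : [c].isPrefixOf s = true := by
          have := (single_pref s c 0).mpr h; rwa [List.drop_zero] at this
        exact ⟨0, le_refl _, by simp [PySem.Chars.rfind.go, hp], h,
          fun i h1 h2 => by omega⟩
      · left
        have hp : ¬ [c].isPrefixOf s = true := fun hc =>
          h ((single_pref s c 0).mp (by rwa [List.drop_zero]))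
        refine ⟨?_, fun i hi => by simpa [Nat.le_zero.mp hi] using h⟩
        simp only [PySem.Chars.rfind.go]
        rw [if_neg hp]
  | succ j ih =>
      by_cases h : s[j+1]? = some c
      · right
        refine ⟨j+1, le_refl _, ?_, h, fun i h1 h2 => by omega⟩
        simp only [PySem.Chars.rfind.go]
        rw [if_pos ((single_pref s c (j+1)).mpr h)]
      · have hgo : PySem.Chars.rfind.go s [c] (j+1) = PySem.Chars.rfind.go s [c] j := by
          simp only [PySem.Chars.rfind.go]
          rw [if_neg (by simpa [single_pref s c (j+1)] using h)]
        rcases ih with ⟨h1, h2⟩ | ⟨k, hk, hgo', hks, hafter⟩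
        · left
          refine ⟨hgo.trans h1, fun i hi => ?_⟩
          rcases Nat.le_succ_iff.mp hi with hi' | hi'
          · exact h2 i hi'
          · subst hi'; exact h
        · right
          refine ⟨k, hk.trans (Nat.le_succ j), hgo.trans hgo', hks, fun i hlt hle => ?_⟩
          rcases Nat.lt_succ_iff_lt_or_eq.mp (Nat.lt_succ_of_le hle) with h' | h'
          · exact hafter i hlt (by omega)
          · subst h'; exact h


lemma isIn_single_iff_mem (u : List Char) (c : Char) :
    PySem.Chars.isIn [c] u = true ↔ c ∈ u := by
  rw [PySem.Chars.isIn_iff_infix]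
  constructor
  · intro h; exact h.subset (by simp)
  · intro h
    obtain ⟨s, t, hst⟩ := List.append_of_mem h
    exact ⟨s, t, by simp [hst]⟩

lemma a_char (cs sep : List Char) (hsep : sep ≠ []) (hsp : ' ' ∉ sep) :
    ((PySem.Chars.isIn sep cs &&
      !(PySem.Chars.isIn [' '] (PySem.List.pyGetD (PySem.Chars.splitOn cs sep) (-1) []))) = true)
    ↔ ∃ t, t <:+ cs ∧ sep <+: t ∧ ' ' ∉ t := by
  have hne : pvSplit sep cs ≠ [] := pvSplit_ne_nil sep cs
  have hXeq : PySem.List.pyGetD (PySem.Chars.splitOn cs sep) (-1) []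
      = (pvSplit sep cs).getLast hne := by
    rw [splitOn_eq_pvSplit sep cs hsep]
    exact PySem.List.pyGetD_neg_one _ _ hne
  set X := (pvSplit sep cs).getLast hne with hX
  have hL : (pvSplit sep cs).getLast? = some X := List.getLast?_eq_some_getLast hne
  rw [hXeq]
  rw [Bool.and_eq_true, Bool.not_eq_eq_eq_not, Bool.not_true]
  constructor
  · rintro ⟨hin, hXsp⟩
    have hinf : sep <:+: cs := (PySem.Chars.isIn_iff_infix sep cs).mp hin
    have hXmem : ' ' ∉ X := fun hm => by
      rw [← Bool.not_eq_true] at hXsp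
      exact hXsp ((isIn_single_iff_mem X ' ').mpr hm)
    obtain ⟨pre, hdec⟩ := pvSplit_last_decomp sep hsep cs X hinf hL
    refine ⟨sep ++ X, ⟨pre, by simpa using hdec.symm⟩, List.prefix_append sep X, ?_⟩
    intro hm
    rcases List.mem_append.mp hm with h | h
    · exact hsp h
    · exact hXmem h
  · rintro ⟨t, hts, hpt, hspt⟩
    obtain ⟨hXsuf, hXnosep⟩ := pvSplit_last_suffix sep hsep cs X hL
    refine ⟨(PySem.Chars.isIn_iff_infix sep cs).mpr (hpt.isInfix.trans hts.isInfix), ?_⟩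
    rw [← Bool.not_eq_true]
    intro hXsp
    have hm : ' ' ∈ X := (isIn_single_iff_mem X ' ').mp hXsp
    rcases List.suffix_or_suffix_of_suffix hts hXsuf with h | h
    · exact hXnosep (hpt.isInfix.trans h.isInfix)
    · exact hspt (h.subset hm)

lemma mem_drop_iff_getElem (cs : List Char) (c : Char) (n : Nat) :
    c ∈ cs.drop n ↔ ∃ i, n ≤ i ∧ cs[i]? = some c := by
  rw [List.mem_iff_getElem?]
  constructor
  · rintro ⟨j, hj⟩
    exact ⟨n + j, Nat.le_add_right n j, by rwa [List.getElem?_drop] at hj⟩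
  · rintro ⟨i, hni, hi⟩
    exact ⟨i - n, by rw [List.getElem?_drop, Nat.add_sub_cancel' hni]; exact hi⟩

lemma b_char (cs sep : List Char) :
    (PySem.Chars.isIn sep (PySem.Chars.slice cs (some (PySem.Chars.rfind cs [' '] + 1)) none) = true)
    ↔ ∃ t, t <:+ cs ∧ sep <+: t ∧ ' ' ∉ t := by
  rcases rfind_go_spec cs ' ' cs.length with ⟨hr, hnone⟩ | ⟨k, hk, hr, hks, hafter⟩
  · -- no space anywhere in cs
    have hrf : PySem.Chars.rfind cs [' '] = -1 := hr
    have hnosp : ' ' ∉ cs := by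
      intro hm
      obtain ⟨j, hj, hje⟩ := List.mem_iff_getElem.mp hm
      exact hnone j (Nat.le_of_lt hj) (by simp [List.getElem?_eq_getElem hj, hje])
    have hsl : PySem.Chars.slice cs (some (PySem.Chars.rfind cs [' '] + 1)) none = cs := by
      rw [hrf]; norm_num
    rw [hsl, PySem.Chars.isIn_iff_infix]
    constructor
    · rintro ⟨s, t, hst⟩
      have hsuf : sep ++ t <:+ cs := ⟨s, by rw [← List.append_assoc]; exact hst⟩
      exact ⟨sep ++ t, hsuf, List.prefix_append sep t, fun hm => hnosp (hsuf.subset hm)⟩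
    · rintro ⟨t, hts, hpt, _⟩
      exact hpt.isInfix.trans hts.isInfix
  · -- last space at index k
    have hrf : PySem.Chars.rfind cs [' '] = (k : Int) := hr
    have hklt : k < cs.length := by
      by_contra h
      exact absurd hks (by simp [List.getElem?_eq_none (by omega : cs.length ≤ k)])
    have hsl : PySem.Chars.slice cs (some (PySem.Chars.rfind cs [' '] + 1)) none
        = cs.drop (k + 1) := by
      rw [hrf]
      have h : ((k : Int) + 1) = ((k + 1 : Nat) : Int) := by push_cast; ring
      rw [PySem.Chars.slice_eq_listSlice, h, PySem.List.slice_from_natCast]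
    have htailsp : ' ' ∉ cs.drop (k + 1) := by
      intro hm
      obtain ⟨i, hni, hi⟩ := (mem_drop_iff_getElem cs ' ' (k+1)).mp hm
      have : i < cs.length := by
        by_contra h
        exact absurd hi (by simp [List.getElem?_eq_none (by omega : cs.length ≤ i)])
      exact hafter i (by omega) (by omega) hi
    rw [hsl, ← PySem.Chars.exists_prefix_drop_iff_isIn]
    constructor
    · rintro ⟨j, hj⟩
      rw [List.drop_drop] at hj
      refine ⟨cs.drop (k + 1 + j), List.drop_suffix _ _, hj, fun hm => ?_⟩
      obtain ⟨i, hni, hi⟩ := (mem_drop_iff_getElem cs ' ' (k+1+j)).mp hm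
      have : i < cs.length := by
        by_contra h
        exact absurd hi (by simp [List.getElem?_eq_none (by omega : cs.length ≤ i)])
      exact hafter i (by omega) (by omega) hi
    · rintro ⟨t, hts, hpt, hspt⟩
      have hteq : t = cs.drop (cs.length - t.length) := List.suffix_iff_eq_drop.mp hts
      set i := cs.length - t.length with hi
      have hki : k + 1 ≤ i := by
        by_contra h
        have hik : i ≤ k := by omega
        have : ' ' ∈ t := by
          rw [hteq, mem_drop_iff_getElem]
          exact ⟨k, hik, hks⟩
        exact hspt this
      refine ⟨i - (k + 1), ?_⟩
      rw [List.drop_drop, Nat.add_sub_cancel' hki, ← hteq]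
      exact hpt

lemma key_eq (cs sep : List Char) (hsep : sep ≠ []) (hsp : ' ' ∉ sep) :
    (PySem.Chars.isIn sep cs &&
      !(PySem.Chars.isIn [' '] (PySem.List.pyGetD (PySem.Chars.splitOn cs sep) (-1) [])))
    = PySem.Chars.isIn sep (PySem.Chars.slice cs (some (PySem.Chars.rfind cs [' '] + 1)) none) := by
  rw [Bool.eq_iff_iff, a_char cs sep hsep hsp, b_char cs sep]

lemma step_shape (a b r : Bool) :
    (if a = true then (if b = true then true else r) else r) = ((a && b) || r) := by
  cases a <;> cases b <;> simp

-- ===== VERDICT (by name: the statement is the Claim_ definition above) =====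
theorem is_url_context_py_spec : Claim_equal_is_url_context_py := by
  intro before _
  unfold Spec_is_url_context_py is_url_context_py is_url_context_py_alt
  simp only [pvALoop, step_shape, List.any_cons, List.any_nil]
  rw [key_eq _ _ (by decide) (by decide), key_eq _ _ (by decide) (by decide),
      key_eq _ _ (by decide) (by decide), key_eq _ _ (by decide) (by decide)]
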